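-- pv_equiv track=rewrite | github.com/TravisBumgarner/pixels64 | my_displays/src/display_color_palettes.py | get_number_of_valid_points_needed
-- ===== SOURCE A (Python) =====
-- def get_number_of_valid_points_needed(cluster, direction):
--     cluster_width = (
--         1 + max(point[0] for point in cluster) - min(point[0] for point in cluster)
--     )
--     cluster_height = (
--         1 + max(point[1] for point in cluster) - min(point[1] for point in cluster)
--     )
--
--     if direction == (0, 1):
--         return cluster_width
--     elif direction == (1, 0):
--         return cluster_height
--     elif direction == (0, -1):
--         return cluster_width
--     elif direction == (-1, 0):
--         return cluster_height
-- ===== SOURCE B (Python) =====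
-- def get_number_of_valid_points_needed(cluster, direction):
--     axis = {(0, 1): 0, (0, -1): 0, (1, 0): 1, (-1, 0): 1}.get(direction)
--     if axis is None:
--         return None
--     coords = sorted(point[axis] for point in cluster)
--     return 1 + coords[-1] - coords[0]
-- ===== Notes on version B (the rewrite author's own statement) =====
-- stated objective: alternative
-- what changed: Replaces A's compute-both-extents-then-if/elif-chain by a dict lookup mapping the direction to the relevant axis, then sorting that axis's coordinates once and taking last - first + 1 of the sorted list; unknown directions are dispatched before touching the cluster.
import Mathlib
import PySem

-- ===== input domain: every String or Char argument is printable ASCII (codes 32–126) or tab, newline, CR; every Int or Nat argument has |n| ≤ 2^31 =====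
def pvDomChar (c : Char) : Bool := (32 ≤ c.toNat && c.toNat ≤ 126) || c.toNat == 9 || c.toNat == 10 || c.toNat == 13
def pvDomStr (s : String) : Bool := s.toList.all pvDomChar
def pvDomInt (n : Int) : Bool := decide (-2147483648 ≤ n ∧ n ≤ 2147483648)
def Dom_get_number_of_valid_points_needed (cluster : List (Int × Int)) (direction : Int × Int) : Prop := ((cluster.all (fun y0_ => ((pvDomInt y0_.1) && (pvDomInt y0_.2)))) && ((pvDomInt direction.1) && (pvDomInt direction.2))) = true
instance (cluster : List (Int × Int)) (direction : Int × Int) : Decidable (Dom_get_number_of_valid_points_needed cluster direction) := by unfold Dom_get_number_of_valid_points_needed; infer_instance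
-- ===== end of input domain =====

-- B replaces A's compute-both-extents-then-if/elif-chain by a dict lookup mapping the
-- direction to the relevant axis, then a single sort of that axis's coordinates and
-- last - first + 1 of the sorted list (alternative decomposition, not claimed faster).

-- ===== PORT A =====
-- A: four generator passes max/min over x- and y-coordinates, then the if/elif chain
-- (implicit None for any other direction).
def get_number_of_valid_points_needed (cluster : List (Int × Int)) (direction : Int × Int) : Option Int :=
  match PySem.List.max? (cluster.map Prod.fst) (fun v => v),
        PySem.List.min? (cluster.map Prod.fst) (fun v => v),
        PySem.List.max? (cluster.map Prod.snd) (fun v => v),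
        PySem.List.min? (cluster.map Prod.snd) (fun v => v) with
  | some mxx, some mnx, some mxy, some mny =>
      let cluster_width := 1 + mxx - mnx
      let cluster_height := 1 + mxy - mny
      if direction = (0, 1) then some cluster_width
      else if direction = (1, 0) then some cluster_height
      else if direction = (0, -1) then some cluster_width
      else if direction = (-1, 0) then some cluster_height
      else none
  | _, _, _, _ => none  -- empty cluster: A raises ValueError (excluded by Pre_)

-- ===== PORT B =====
-- B: {direction: axis}.get(direction); None → return None; else sort that axis's
-- coordinates and return 1 + coords[-1] - coords[0].
def get_number_of_valid_points_needed_alt (cluster : List (Int × Int)) (direction : Int × Int) : Option Int :=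
  let table : PySem.Dict (Int × Int) Int :=
    PySem.Dict.ofList [((0, 1), 0), ((0, -1), 0), ((1, 0), 1), ((-1, 0), 1)]
  match PySem.Dict.get? table direction with
  | none => none
  | some axis =>
      -- point[axis]: exact for axis ∈ {0, 1}, the only values in the table
      let coords := PySem.List.sorted (cluster.map (fun p => if axis = 0 then p.1 else p.2)) (fun v => v) false
      match PySem.List.pyGet? coords (-1), PySem.List.pyGet? coords 0 with
      | some last, some first => some (1 + last - first)
      | some _, none => none  -- empty cluster: B raises IndexError (excluded by Pre_)
      | none, some _ => none
      | none, none => none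

-- ===== PRECONDITION & SPEC =====
-- Pre_ excludes only the empty cluster, on which A raises ValueError (max() of an empty sequence).
def Pre_get_number_of_valid_points_needed (cluster : List (Int × Int)) (direction : Int × Int) : Prop := cluster ≠ []
instance (cluster : List (Int × Int)) (direction : Int × Int) : Decidable (Pre_get_number_of_valid_points_needed cluster direction) := by unfold Pre_get_number_of_valid_points_needed; infer_instance
def pvWitness_get_number_of_valid_points_needed : (List (Int × Int)) × (Int × Int) := ([(1, 2), (3, 0)], (0, 1))

def Spec_get_number_of_valid_points_needed (cluster : List (Int × Int)) (direction : Int × Int) (out : Option Int) : Prop := out = get_number_of_valid_points_needed_alt cluster direction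
instance (cluster : List (Int × Int)) (direction : Int × Int) (out : Option Int) : Decidable (Spec_get_number_of_valid_points_needed cluster direction out) := by unfold Spec_get_number_of_valid_points_needed; infer_instance

-- ===== CLAIM (what is proved, stated in full; the proofs are below) =====
def Claim_equal_get_number_of_valid_points_needed : Prop := ∀ (cluster : List (Int × Int)) (direction : Int × Int), Dom_get_number_of_valid_points_needed cluster direction → Pre_get_number_of_valid_points_needed cluster direction → Spec_get_number_of_valid_points_needed cluster direction (get_number_of_valid_points_needed cluster direction)

-- ===== LEMMAS AND PROOFS =====

-- The head of the sorted list is the running-min fold (the value of min(xs)).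
theorem head_sorted_eq_foldl_min (x : Int) (t : List Int) :
    (PySem.List.sorted (x :: t) (fun v => v) false)[0]? = some (List.foldl min x t) := by
  have hne : PySem.List.sorted (x :: t) (fun v => v) false ≠ [] := by
    simp [PySem.List.sorted_eq_nil_iff]
  obtain ⟨m, rest, heq⟩ := List.exists_cons_of_ne_nil hne
  have hmin : PySem.List.min? (x :: t) (fun v => v) = some (List.foldl min x t) :=
    PySem.List.min?_id_cons x t
  have h1 : m ≤ List.foldl min x t :=
    PySem.List.key_head_sorted_le (x :: t) (fun v => v) heq _ (PySem.List.min?_mem hmin)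
  have h2 : List.foldl min x t ≤ m := by
    apply PySem.List.min?_isMin hmin
    exact (PySem.List.mem_sorted (x :: t) (fun v => v) false m).1 (heq ▸ List.mem_cons_self)
  rw [heq]
  simp [le_antisymm h2 h1]

theorem last_sorted_eq_foldl_max (x : Int) (t : List Int) :
    (PySem.List.sorted (x :: t) (fun v => v) false).getLast? = some (List.foldl max x t) := by
  have hlen : (PySem.List.sorted (x :: t) (fun v => v) false).length = t.length + 1 := by
    simp [PySem.List.length_sorted]
  have hmax : PySem.List.max? (x :: t) (fun v => v) = some (List.foldl max x t) :=
    PySem.List.max?_id_cons x t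
  have hM : List.foldl max x t ∈ PySem.List.sorted (x :: t) (fun v => v) false :=
    (PySem.List.mem_sorted (x :: t) (fun v => v) false _).2 (PySem.List.max?_mem hmax)
  obtain ⟨p, hp, hpe⟩ := List.mem_iff_getElem.1 hM
  have hq : (PySem.List.sorted (x :: t) (fun v => v) false).length - 1
      < (PySem.List.sorted (x :: t) (fun v => v) false).length := by omega
  have hmono := PySem.List.key_sorted_getElem_mono (x :: t) (fun v => v)
    (p := p) (q := (PySem.List.sorted (x :: t) (fun v => v) false).length - 1) (by omega) hq
  have hlast_mem : (PySem.List.sorted (x :: t) (fun v => v) false)[(PySem.List.sorted (x :: t) (fun v => v) false).length - 1] ∈ x :: t :=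
    (PySem.List.mem_sorted (x :: t) (fun v => v) false _).1 (List.getElem_mem _)
  have h2 := PySem.List.max?_isMax hmax _ hlast_mem
  have heq : (PySem.List.sorted (x :: t) (fun v => v) false)[(PySem.List.sorted (x :: t) (fun v => v) false).length - 1] = List.foldl max x t :=
    le_antisymm h2 (hpe ▸ hmono)
  rw [List.getLast?_eq_getElem?, List.getElem?_eq_getElem hq, heq]

theorem get_number_of_valid_points_needed_eq (cluster : List (Int × Int)) (direction : Int × Int)
    (h : cluster ≠ []) :
    get_number_of_valid_points_needed cluster direction
      = get_number_of_valid_points_needed_alt cluster direction := by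
  match cluster with
  | [] => exact absurd rfl h
  | (x0, y0) :: rest =>
    by_cases h1 : direction = ((0 : Int), (1 : Int))
    · subst h1
      have hd : PySem.Dict.get? (PySem.Dict.ofList [(((0:Int), (1:Int)), (0:Int)), ((0, -1), 0), ((1, 0), 1), ((-1, 0), 1)]) (0, 1) = some 0 := by decide
      simp only [get_number_of_valid_points_needed, get_number_of_valid_points_needed_alt, hd,
        List.map_cons, PySem.List.max?_id_cons, PySem.List.min?_id_cons,
        PySem.List.pyGet?_neg_one, PySem.List.pyGet?_zero]
      simp only [if_true]
      rw [last_sorted_eq_foldl_max, head_sorted_eq_foldl_min]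
    · by_cases h2 : direction = ((1 : Int), (0 : Int))
      · subst h2
        have hd : PySem.Dict.get? (PySem.Dict.ofList [(((0:Int), (1:Int)), (0:Int)), ((0, -1), 0), ((1, 0), 1), ((-1, 0), 1)]) (1, 0) = some 1 := by decide
        simp only [get_number_of_valid_points_needed, get_number_of_valid_points_needed_alt, hd,
          List.map_cons, PySem.List.max?_id_cons, PySem.List.min?_id_cons,
          PySem.List.pyGet?_neg_one, PySem.List.pyGet?_zero]
        simp only [show ((1:Int) = 0) = False by simp, if_false,
          show (((1:Int),(0:Int)) = ((0:Int),(1:Int))) = False by simp, if_true]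
        rw [last_sorted_eq_foldl_max, head_sorted_eq_foldl_min]
      · by_cases h3 : direction = ((0 : Int), (-1 : Int))
        · subst h3
          have hd : PySem.Dict.get? (PySem.Dict.ofList [(((0:Int), (1:Int)), (0:Int)), ((0, -1), 0), ((1, 0), 1), ((-1, 0), 1)]) (0, -1) = some 0 := by decide
          simp only [get_number_of_valid_points_needed, get_number_of_valid_points_needed_alt, hd,
            List.map_cons, PySem.List.max?_id_cons, PySem.List.min?_id_cons,
            PySem.List.pyGet?_neg_one, PySem.List.pyGet?_zero]
          simp only [show (((0:Int),(-1:Int)) = ((0:Int),(1:Int))) = False by simp,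
            show (((0:Int),(-1:Int)) = ((1:Int),(0:Int))) = False by simp, if_false, if_true]
          rw [last_sorted_eq_foldl_max, head_sorted_eq_foldl_min]
        · by_cases h4 : direction = ((-1 : Int), (0 : Int))
          · subst h4
            have hd : PySem.Dict.get? (PySem.Dict.ofList [(((0:Int), (1:Int)), (0:Int)), ((0, -1), 0), ((1, 0), 1), ((-1, 0), 1)]) (-1, 0) = some 1 := by decide
            simp only [get_number_of_valid_points_needed, get_number_of_valid_points_needed_alt, hd,
              List.map_cons, PySem.List.max?_id_cons, PySem.List.min?_id_cons,
              PySem.List.pyGet?_neg_one, PySem.List.pyGet?_zero]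
            simp only [show ((1:Int) = 0) = False by simp,
              show (((-1:Int),(0:Int)) = ((0:Int),(1:Int))) = False by simp,
              show (((-1:Int),(0:Int)) = ((1:Int),(0:Int))) = False by simp,
              show (((-1:Int),(0:Int)) = ((0:Int),(-1:Int))) = False by simp, if_false, if_true]
            rw [last_sorted_eq_foldl_max, head_sorted_eq_foldl_min]
          · have hd : PySem.Dict.get? (PySem.Dict.ofList [(((0:Int), (1:Int)), (0:Int)), ((0, -1), 0), ((1, 0), 1), ((-1, 0), 1)]) direction = none := by
              simp [PySem.Dict.ofList, PySem.Dict.update, PySem.Dict.get?_insert, h1, h2, h3, h4]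
            simp only [get_number_of_valid_points_needed, get_number_of_valid_points_needed_alt, hd,
              List.map_cons, PySem.List.max?_id_cons, PySem.List.min?_id_cons]
            simp [h1, h2, h3, h4]

-- ===== VERDICT (by name: the statement is the Claim_ definition above) =====
theorem get_number_of_valid_points_needed_spec : Claim_equal_get_number_of_valid_points_needed := by
  intro cluster direction _ hpre
  exact get_number_of_valid_points_needed_eq cluster direction hpre
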